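-- pv_equiv track=rewrite | github.com/luisaapach/PythonLab | laboratory_1/Apachitei_Luisa/laboratory_1.py | function10
-- ===== SOURCE A (Python) =====
-- def function10(text):
--     """solutia 1 one line"""
--     return len(text.split(" "))-text.split(" ").count("")
--     """solutia 2 - in cazul in care existau mai multe spatii"""
--     nr = 0
--     words = text.split(" ")
--     for i in range(len(words)):
--         if len(words[i])!=0:
--             nr += 1
--     return nr
-- ===== SOURCE B (Python) =====
-- def function10(text):
--     nr = 0
--     prev_space = True
--     for ch in text:
--         if ch != ' ' and prev_space:
--             nr += 1
--         prev_space = (ch == ' ')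
--     return nr
-- ===== Notes on version B (the rewrite author's own statement) =====
-- stated objective: simpler
-- what changed: Replaces building the split list twice and subtracting the count of empty pieces with a single character scan keeping a previous-was-space flag and counting word starts.
import Mathlib
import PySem

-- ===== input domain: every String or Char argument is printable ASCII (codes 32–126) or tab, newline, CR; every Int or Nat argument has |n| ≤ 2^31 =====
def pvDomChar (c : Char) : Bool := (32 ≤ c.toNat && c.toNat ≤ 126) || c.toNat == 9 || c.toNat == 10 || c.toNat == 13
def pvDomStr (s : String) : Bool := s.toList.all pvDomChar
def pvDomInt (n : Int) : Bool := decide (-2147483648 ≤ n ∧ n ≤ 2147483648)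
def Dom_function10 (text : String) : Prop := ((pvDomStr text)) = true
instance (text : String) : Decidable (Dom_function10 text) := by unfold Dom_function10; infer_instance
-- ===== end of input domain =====

-- B replaces A's double split(" ") pass (len minus count of empty pieces) by a single
-- character scan with a previous-was-space flag; return values agree everywhere.

-- ===== PORT A =====
-- text.split(" ") is PySem.Chars.splitOn on the character list (sep is nonempty, so
-- Python's split never raises); len(...) - ....count("") is Int subtraction of the counts.
def function10 (text : String) : Int :=
  (PySem.Chars.splitOn text.toList [' ']).length
    - (PySem.List.count (PySem.Chars.splitOn text.toList [' ']) ([] : List Char) : Int)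

-- ===== PORT B =====
def function10_alt (text : String) : Int :=
  (text.toList.foldl
    (fun (st : Int × Bool) ch =>
      (if ch ≠ ' ' ∧ st.2 = true then st.1 + 1 else st.1, ch == ' '))
    (0, true)).1

-- ===== PRECONDITION & SPEC =====
def Spec_function10 (text : String) (out : Int) : Prop := out = function10_alt text
instance (text : String) (out : Int) : Decidable (Spec_function10 text out) := by unfold Spec_function10; infer_instance

-- ===== CLAIM (what is proved, stated in full; the proofs are below) =====
def Claim_equal_function10 : Prop := ∀ (text : String), Dom_function10 text → Spec_function10 text (function10 text)

-- ===== LEMMAS AND PROOFS =====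

-- the pieces produced by splitting on ' ' given the reversed current partial word `cur`
def pieces : List Char → List Char → List (List Char)
  | [], cur => [cur.reverse]
  | c :: rest, cur => if c = ' ' then cur.reverse :: pieces rest [] else pieces rest (c :: cur)

-- words counted by B's scan given the previous-was-space flag
def bw : List Char → Bool → Nat
  | [], _ => 0
  | c :: rest, prev => (if c ≠ ' ' ∧ prev = true then 1 else 0) + bw rest (c == ' ')

lemma go_spec (l cur : List Char) (acc : List (List Char)) (fuel : Nat) (h : l.length < fuel) :
    PySem.Chars.splitOn.go [' '] fuel l cur acc = acc.reverse ++ pieces l cur := by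
  induction fuel generalizing l cur acc with
  | zero => omega
  | succ f ih =>
    cases l with
    | nil => rw [PySem.Chars.splitOn.go.eq_def]; simp [pieces]
    | cons c rest =>
      rw [PySem.Chars.splitOn.go.eq_def]
      simp only []
      by_cases hc : c = ' '
      · subst hc
        rw [if_pos (by simp [List.isPrefixOf])]
        rw [ih _ _ _ (by simp at h ⊢; omega)]
        simp [pieces]
      · rw [if_neg (by simp [List.isPrefixOf]; exact fun h' => hc h'.symm)]
        rw [ih _ _ _ (by simp at h ⊢; omega)]
        simp [pieces, hc]

lemma pieces_countP (l cur : List Char) :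
    (pieces l cur).countP (fun p => p ≠ ([] : List Char)) =
      (if cur ≠ [] then 1 else 0) + bw l (cur = []) := by
  induction l generalizing cur with
  | nil => cases cur <;> simp [pieces, bw, List.countP, List.countP.go]
  | cons c rest ih =>
    have hb : ∀ d : Char, d ≠ ' ' → (d == ' ') = false := by intro d hd; simp [hd]
    by_cases hc : c = ' '
    · subst hc
      rw [show pieces (' ' :: rest) cur = cur.reverse :: pieces rest [] from by
        simp [pieces]]
      rw [List.countP_cons, ih []]
      cases cur <;> simp [bw] <;> omega
    · rw [show pieces (c :: rest) cur = pieces rest (c :: cur) from by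
        simp [pieces, hc]]
      rw [ih (c :: cur)]
      simp only [bw, hb c hc]
      cases cur <;> simp [hc]

lemma count_eq_countP (l cur : List Char) :
    PySem.List.count (pieces l cur) ([] : List Char) =
      (pieces l cur).countP (fun p => p = ([] : List Char)) := by
  rw [show PySem.List.count (pieces l cur) ([] : List Char)
      = List.count ([] : List Char) (pieces l cur) from rfl]
  rw [List.count_eq_countP]
  congr 1
  funext p
  exact Bool.beq_eq_decide_eq p []

lemma foldl_bw (l : List Char) (n : Int) (prev : Bool) :
    (l.foldl
      (fun (st : Int × Bool) ch =>
        (if ch ≠ ' ' ∧ st.2 = true then st.1 + 1 else st.1, ch == ' '))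
      (n, prev)).1 = n + bw l prev := by
  induction l generalizing n prev with
  | nil => simp [bw]
  | cons c rest ih =>
    simp only [List.foldl_cons, bw]
    rw [ih]
    by_cases h : c ≠ ' ' ∧ prev = true <;> simp [h] <;> omega

lemma countP_split (l : List Char) (cur : List Char) :
    ((pieces l cur).length : Int) - (PySem.List.count (pieces l cur) ([] : List Char) : Int)
      = ((pieces l cur).countP (fun p => p ≠ ([] : List Char)) : Int) := by
  have h1 := count_eq_countP l cur
  have h2 : (pieces l cur).countP (fun p => p = ([] : List Char))
      + (pieces l cur).countP (fun p => p ≠ ([] : List Char)) = (pieces l cur).length := by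
    have := List.length_eq_countP_add_countP (fun p => decide (p = ([] : List Char)))
      (l := pieces l cur)
    simp only [decide_not] at this ⊢
    have h2 : List.countP (fun a => !decide (decide (a = ([] : List Char)) = true)) (pieces l cur)
        = List.countP (fun p => !decide (p = ([] : List Char))) (pieces l cur) := by
      simp
    omega
  omega

-- ===== VERDICT (by name: the statement is the Claim_ definition above) =====
theorem function10_spec : Claim_equal_function10 := by
  intro text _
  unfold Spec_function10 function10 function10_alt
  unfold PySem.Chars.splitOn
  rw [go_spec _ _ _ _ (by omega)]
  simp only [List.reverse_nil, List.nil_append]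
  rw [countP_split, foldl_bw]
  rw [pieces_countP]
  simp
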